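-- pv_equiv track=rewrite | github.com/RobbenRibery/TuoTuo | src/utils.py | get_vocab_from_docs
-- ===== SOURCE A (Python) =====
-- from typing import List, Dict, Union
--
-- def get_vocab_from_docs(docs:List[List[str]]):
--
--     w_ct_dict = {}
--
--     for id, doc in enumerate(docs):
--
--         for word in doc:
--
--             if word not in w_ct_dict:
--                 w_ct_dict[word] = [0]*len(docs)
--
--             w_ct_dict[word][id] += 1
--
--     return w_ct_dict
-- ===== SOURCE B (Python) =====
-- from typing import List, Dict, Union
--
-- def get_vocab_from_docs(docs: List[List[str]]):
--     # vocabulary in first-occurrence order, then one count-vector per word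
--     vocab = dict.fromkeys(word for doc in docs for word in doc)
--     return {word: [doc.count(word) for doc in docs] for word in vocab}
-- ===== Notes on version B (the rewrite author's own statement) =====
-- stated objective: simpler
-- what changed: B replaces A's token-by-token increments into mutable dense vectors by a declarative two-phase build: extract the vocabulary as an ordered dedup of all tokens, then construct each word's vector directly as [doc.count(word) for doc in docs].
import Mathlib
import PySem

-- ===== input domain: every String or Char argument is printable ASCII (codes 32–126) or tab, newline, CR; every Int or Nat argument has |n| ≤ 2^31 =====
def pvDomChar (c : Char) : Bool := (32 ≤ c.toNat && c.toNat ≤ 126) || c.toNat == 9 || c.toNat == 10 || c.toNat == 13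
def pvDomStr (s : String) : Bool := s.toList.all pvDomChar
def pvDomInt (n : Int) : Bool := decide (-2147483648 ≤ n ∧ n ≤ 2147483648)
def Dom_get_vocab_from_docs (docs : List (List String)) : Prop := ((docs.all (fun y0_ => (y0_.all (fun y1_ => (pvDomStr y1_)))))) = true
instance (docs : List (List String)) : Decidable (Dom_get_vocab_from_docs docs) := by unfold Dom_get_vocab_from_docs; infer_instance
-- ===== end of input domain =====

-- B builds the ordered vocabulary first and then constructs each word's count
-- vector declaratively (one count per document), instead of A's token-by-token
-- increments into mutable dense vectors (objective: simpler).

-- ===== PORT A =====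
-- body of A's inner loop: 'if word not in d: d[word] = [0]*n ; d[word][id] += 1'
def pvStepA (n : Nat) (id : Nat) (d : PySem.Dict String (List Int)) (word : String) :
    PySem.Dict String (List Int) :=
  let d1 := if d.contains word then d else d.insert word (List.replicate n 0)
  d1.modify word [] (fun v => v.set id (v.getD id 0 + 1))

-- 'for id, doc in enumerate(docs):' as structural recursion over the docs
def pvLoopA (n : Nat) : Nat → List (List String) → PySem.Dict String (List Int) →
    PySem.Dict String (List Int)
  | _, [], d => d
  | id, doc :: rest, d => pvLoopA n (id + 1) rest (doc.foldl (pvStepA n id) d)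

def get_vocab_from_docs (docs : List (List String)) : List (String × List Int) :=
  (pvLoopA docs.length 0 docs PySem.Dict.empty).items

-- ===== PORT B =====
-- 'vocab = dict.fromkeys(word for doc in docs for word in doc)' then
-- '{word: [doc.count(word) for doc in docs] for word in vocab}'
def get_vocab_from_docs_alt (docs : List (List String)) : List (String × List Int) :=
  let vocab := PySem.List.dedup (docs.flatMap (fun d => d))
  vocab.map (fun w => (w, docs.map (fun doc => ((doc.count w : Nat) : Int))))

-- ===== PRECONDITION & SPEC =====
def Spec_get_vocab_from_docs (docs : List (List String)) (out : List (String × List Int)) : Prop := out = get_vocab_from_docs_alt docs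
instance (docs : List (List String)) (out : List (String × List Int)) : Decidable (Spec_get_vocab_from_docs docs out) := by unfold Spec_get_vocab_from_docs; infer_instance

-- ===== CLAIM (what is proved, stated in full; the proofs are below) =====
def Claim_equal_get_vocab_from_docs : Prop := ∀ (docs : List (List String)), Dom_get_vocab_from_docs docs → Spec_get_vocab_from_docs docs (get_vocab_from_docs docs)

-- ===== LEMMAS AND PROOFS =====

-- the vector a step of A works on: the stored one, or the fresh zero vector
def pvV (n : Nat) (d : PySem.Dict String (List Int)) (w : String) : List Int :=
  (d.get? w).getD (List.replicate n 0)

-- A's loop body is a single insert of the updated vector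
theorem pvStepA_eq (n id : Nat) (d : PySem.Dict String (List Int)) (w : String) :
    pvStepA n id d w = d.insert w ((pvV n d w).set id ((pvV n d w).getD id 0 + 1)) := by
  unfold pvStepA pvV
  cases hc : d.contains w with
  | false =>
    have hg : d.get? w = none := (PySem.Dict.get?_eq_none_iff_contains d w).2 hc
    simp [PySem.Dict.modify, hg, PySem.Dict.getD_insert_self, PySem.Dict.insert_insert_self]
  | true =>
    obtain ⟨v, hv⟩ : ∃ v, d.get? w = some v := by
      have := PySem.Dict.contains_eq_isSome_get? d w
      rw [hc] at this; exact Option.isSome_iff_exists.1 this.symm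
    simp [PySem.Dict.modify, hv, PySem.Dict.getD_of_get?_eq_some d [] hv]

theorem pvV_len (n : Nat) (d : PySem.Dict String (List Int))
    (hlen : ∀ w v, d.get? w = some v → v.length = n) (x : String) :
    (pvV n d x).length = n := by
  cases hg : d.get? x with
  | none => simp [pvV, hg]
  | some v => simp [pvV, hg, hlen x v hg]

-- characterization of A's inner token loop: the slot at id accumulates the count
theorem pvFoldA_get (n id : Nat) (ws : List String) (d : PySem.Dict String (List Int))
    (hlen : ∀ w v, d.get? w = some v → v.length = n) (hid : id < n) (w : String) :
    (ws.foldl (pvStepA n id) d).get? w =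
      if w ∈ ws then some ((pvV n d w).set id ((pvV n d w).getD id 0 + ws.count w))
      else d.get? w := by
  induction ws generalizing d with
  | nil => simp
  | cons x t ih =>
    have hVlen := pvV_len n d hlen x
    set d' := pvStepA n id d x with hd'
    have hins : d' = d.insert x ((pvV n d x).set id ((pvV n d x).getD id 0 + 1)) :=
      pvStepA_eq n id d x
    have hget' : ∀ y, d'.get? y =
        if y = x then some ((pvV n d x).set id ((pvV n d x).getD id 0 + 1)) else d.get? y := by
      intro y; rw [hins, PySem.Dict.get?_insert]
    have hlen' : ∀ y v, d'.get? y = some v → v.length = n := by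
      intro y v hv; rw [hget'] at hv
      split at hv
      · cases hv; simpa using hVlen
      · exact hlen y v hv
    have hV' : ∀ y, y ≠ x → pvV n d' y = pvV n d y := by
      intro y hy; unfold pvV; rw [hget', if_neg hy]
    have hV'x : pvV n d' x = (pvV n d x).set id ((pvV n d x).getD id 0 + 1) := by
      unfold pvV; rw [hget', if_pos rfl]; rfl
    show (t.foldl (pvStepA n id) d').get? w = _
    rw [ih d' hlen']
    by_cases hwx : w = x
    · subst hwx
      have hgd : (pvV n d' w).getD id 0 = (pvV n d w).getD id 0 + 1 := by
        rw [hV'x]; simp [List.getD, hVlen ▸ hid]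
      by_cases hwt : w ∈ t
      · rw [if_pos hwt, if_pos (List.mem_cons_self)]
        rw [hgd, hV'x, List.set_set]
        simp only [Option.some.injEq, List.count_cons_self]
        congr 1; push_cast; ring
      · rw [if_neg hwt, if_pos (List.mem_cons_self), hget', if_pos rfl]
        rw [List.count_cons_self, (List.count_eq_zero).2 hwt]
        norm_num
    · have : (w ∈ x :: t) ↔ w ∈ t := by simp [hwx]
      rw [hV' w hwx, hget', if_neg hwx]
      simp [this, Ne.symm hwx]

theorem pvFoldA_keys (n id : Nat) (ws : List String) (d : PySem.Dict String (List Int)) :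
    (ws.foldl (pvStepA n id) d).keys = PySem.Set.update d.keys ws := by
  have h : pvStepA n id =
      fun d x => d.insert x ((pvV n d x).set id ((pvV n d x).getD id 0 + 1)) := by
    funext d x; exact pvStepA_eq n id d x
  rw [h, PySem.Dict.keys_foldl_insert]

-- the invariant carried from doc to doc: keys distinct, vectors of length n,
-- and every slot from the current doc index on still zero
def pvInv (n : Nat) (id : Nat) (d : PySem.Dict String (List Int)) : Prop :=
  d.keys.Nodup ∧
  ∀ w v, d.get? w = some v → v.length = n ∧ ∀ j, id ≤ j → v.getD j 0 = 0

theorem pvV_zero' (n id : Nat) (d : PySem.Dict String (List Int)) (hinv : pvInv n id d)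
    (k : String) (j : Nat) (hj : id ≤ j) : (pvV n d k).getD j 0 = 0 := by
  unfold pvV
  cases h : d.get? k with
  | none => simp [List.getD]
  | some v => exact ((hinv.2 k v h).2 j hj)

theorem pvInv_step (n id : Nat) (ws : List String) (d : PySem.Dict String (List Int))
    (hinv : pvInv n id d) (hid : id < n) :
    pvInv n (id + 1) (ws.foldl (pvStepA n id) d) := by
  have hlen : ∀ w v, d.get? w = some v → v.length = n := fun w v h => (hinv.2 w v h).1
  constructor
  · rw [pvFoldA_keys]; exact PySem.Set.nodup_update _ _ hinv.1
  · intro w v hv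
    rw [pvFoldA_get n id ws d hlen hid w] at hv
    split at hv
    · cases hv
      refine ⟨by simpa using pvV_len n d hlen w, fun j hj => ?_⟩
      have hji : id ≠ j := by omega
      have : ((pvV n d w).set id ((pvV n d w).getD id 0 + ↑(List.count w ws))).getD j 0
          = (pvV n d w).getD j 0 := by
        simp [List.getD, hji]
      rw [this]
      exact pvV_zero' n id d hinv w j (by omega)
    · exact ⟨(hinv.2 w v hv).1, fun j hj => (hinv.2 w v hv).2 j (by omega)⟩

-- taking one more element of a vector appends its slot value
theorem pv_take_succ_getD (v : List Int) (id : Nat) (h : id < v.length) :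
    v.take (id + 1) = v.take id ++ [v.getD id 0] := by
  rw [List.take_add_one, List.getD, List.getElem?_eq_getElem h]
  rfl

-- main characterization: the final lookup of every word is its per-doc count vector
theorem pvLoopA_get (n : Nat) (rest : List (List String)) (id : Nat)
    (d : PySem.Dict String (List Int)) (hinv : pvInv n id d)
    (h : id + rest.length = n) (w : String) :
    (pvLoopA n id rest d).get? w =
      if w ∈ d.keys ∨ w ∈ rest.flatMap (fun x => x) then
        some ((pvV n d w).take id ++ rest.map (fun doc => ((doc.count w : Nat) : Int)))
      else none := by
  induction rest generalizing id d with
  | nil =>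
    simp only [pvLoopA, List.flatMap_nil, List.not_mem_nil, or_false, List.map_nil,
      List.append_nil]
    by_cases hk : w ∈ d.keys
    · rw [if_pos hk]
      obtain ⟨v, hv⟩ : ∃ v, d.get? w = some v := by
        have hc : d.contains w = true := (PySem.Dict.contains_iff_mem_keys d w).2 hk
        have := PySem.Dict.contains_eq_isSome_get? d w
        rw [hc] at this; exact Option.isSome_iff_exists.1 this.symm
      have hvlen : v.length = n := (hinv.2 w v hv).1
      have : id = n := by simpa using h
      rw [hv]
      simp [pvV, hv, List.take_of_length_le, hvlen, this]
    · rw [if_neg hk]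
      exact (PySem.Dict.get?_eq_none_iff_not_mem_keys d w).2 hk
  | cons doc t ih =>
    have hid : id < n := by simp at h; omega
    have hlen : ∀ y v, d.get? y = some v → v.length = n := fun y v hy => (hinv.2 y v hy).1
    set d' := doc.foldl (pvStepA n id) d with hd'
    have hinv' : pvInv n (id + 1) d' := pvInv_step n id doc d hinv hid
    show (pvLoopA n (id + 1) t d').get? w = _
    rw [ih (id + 1) d' hinv' (by simp at h ⊢; omega)]
    have hkeys' : w ∈ d'.keys ↔ w ∈ d.keys ∨ w ∈ doc := by
      rw [hd', pvFoldA_keys, PySem.Set.mem_update]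
    have hmem : (w ∈ d'.keys ∨ w ∈ t.flatMap (fun x => x)) ↔
        (w ∈ d.keys ∨ w ∈ (doc :: t).flatMap (fun x => x)) := by
      simp [hkeys', or_assoc]
    rw [if_congr hmem rfl rfl]
    by_cases hm : w ∈ d.keys ∨ w ∈ (doc :: t).flatMap (fun x => x)
    · rw [if_pos hm, if_pos hm]
      have hVlen : (pvV n d w).length = n := pvV_len n d hlen w
      have hzero : (pvV n d w).getD id 0 = 0 := pvV_zero' n id d hinv w id le_rfl
      have hkey : (pvV n d' w).take (id + 1)
          = (pvV n d w).take id ++ [((doc.count w : Nat) : Int)] := by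
        by_cases hwd : w ∈ doc
        · have hg : d'.get? w = some ((pvV n d w).set id ((pvV n d w).getD id 0 + doc.count w)) := by
            rw [hd', pvFoldA_get n id doc d hlen hid w, if_pos hwd]
          have hV' : pvV n d' w = (pvV n d w).set id ((doc.count w : Nat) : Int) := by
            unfold pvV; rw [hg, hzero, zero_add]; rfl
          rw [hV', pv_take_succ_getD _ id (by simpa [hVlen] using hid)]
          congr 1
          · rw [List.take_set]
            exact List.set_eq_of_length_le (by simp)
          · simp [List.getD, List.getElem?_set_self',
              List.getElem?_eq_getElem (show id < (pvV n d w).length by omega)]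
        · have hg : d'.get? w = d.get? w := by
            rw [hd', pvFoldA_get n id doc d hlen hid w, if_neg hwd]
          have hV' : pvV n d' w = pvV n d w := by unfold pvV; rw [hg]
          have hc0 : doc.count w = 0 := List.count_eq_zero.2 hwd
          rw [hV', pv_take_succ_getD _ id (by omega), hzero, hc0]
          norm_num
      rw [hkey, List.map_cons, List.append_assoc]
      rfl
    · rw [if_neg hm, if_neg hm]

theorem pvLoopA_keys (n : Nat) (rest : List (List String)) (id : Nat)
    (d : PySem.Dict String (List Int)) :
    (pvLoopA n id rest d).keys = PySem.Set.update d.keys (rest.flatMap (fun x => x)) := by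
  induction rest generalizing id d with
  | nil => simp [pvLoopA, PySem.Set.update]
  | cons doc t ih =>
    show (pvLoopA n (id + 1) t (doc.foldl (pvStepA n id) d)).keys = _
    rw [ih, pvFoldA_keys, List.flatMap_cons, PySem.Set.update, PySem.Set.update,
      PySem.Set.update, List.foldl_append]

-- ===== VERDICT (by name: the statement is the Claim_ definition above) =====
theorem get_vocab_from_docs_spec : Claim_equal_get_vocab_from_docs := by
  intro docs _
  unfold Spec_get_vocab_from_docs get_vocab_from_docs get_vocab_from_docs_alt
  have hinv0 : pvInv docs.length 0 (PySem.Dict.empty : PySem.Dict String (List Int)) :=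
    ⟨by simp [PySem.Dict.keys_empty], by simp [PySem.Dict.get?_empty]⟩
  have hkeys : (pvLoopA docs.length 0 docs PySem.Dict.empty).keys
      = PySem.Set.ofList (docs.flatMap (fun x => x)) := by
    rw [pvLoopA_keys]
    simp [PySem.Set.update, PySem.Set.ofList_eq_foldl, PySem.Dict.keys_empty]
  have hnd : (pvLoopA docs.length 0 docs PySem.Dict.empty).keys.Nodup := by
    rw [hkeys]; exact PySem.Set.nodup_ofList _
  rw [PySem.Dict.items_eq_map_keys _ hnd [], hkeys, PySem.List.dedup_eq_ofList]
  refine List.map_congr_left fun w hw => ?_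
  have hget := pvLoopA_get docs.length docs 0 PySem.Dict.empty hinv0 (by simp) w
  have hw' : w ∈ docs.flatMap (fun x => x) := (PySem.Set.mem_ofList _ w).1 hw
  rw [if_pos (Or.inr hw')] at hget
  rw [PySem.Dict.getD_eq_get?_getD, hget]
  simp
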